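-- pv_equiv track=rewrite | github.com/yingzhuo1994/AlgoExpert | assessments/BuildFailures.py | getLongestDecreasingSubarrayLength
-- ===== SOURCE A (Python) =====
-- def getLongestDecreasingSubarrayLength(array):
--     longestLength = 1
--     currentLongestLength = 1
--
--     for i in range(1, len(array)):
--         if array[i] < array[i - 1]:
--             currentLongestLength += 1
--             longestLength = max(longestLength, currentLongestLength)
--         else:
--             currentLongestLength = 1
--
--     return longestLength if longestLength > 1 else -1
-- ===== SOURCE B (Python) =====
-- def getLongestDecreasingSubarrayLength(array):
--     n = len(array)
--     bounds = [0] + [i for i in range(1, n) if array[i] >= array[i - 1]] + [n]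
--     best = 0
--     for a, b in zip(bounds, bounds[1:]):
--         best = max(best, b - a)
--     return best if best > 1 else -1
-- ===== Notes on version B (the rewrite author's own statement) =====
-- stated objective: alternative
-- what changed: Replaces A's single-pass running-counter-with-max loop by building the list of break indices (where strict decrease fails) bracketed by 0 and len(array), then taking the maximum gap between consecutive boundaries.
import Mathlib
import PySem

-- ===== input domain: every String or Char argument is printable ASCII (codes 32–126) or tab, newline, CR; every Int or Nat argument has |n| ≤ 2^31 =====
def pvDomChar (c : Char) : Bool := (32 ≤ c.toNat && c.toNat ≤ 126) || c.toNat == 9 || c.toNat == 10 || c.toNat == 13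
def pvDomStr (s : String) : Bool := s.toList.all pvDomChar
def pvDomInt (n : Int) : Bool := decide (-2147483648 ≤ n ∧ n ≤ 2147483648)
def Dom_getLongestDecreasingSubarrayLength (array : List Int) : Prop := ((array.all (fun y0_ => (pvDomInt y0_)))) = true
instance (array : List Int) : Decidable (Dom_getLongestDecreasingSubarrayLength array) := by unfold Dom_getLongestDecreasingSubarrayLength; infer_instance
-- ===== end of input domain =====

-- B replaces A's running-counter loop by a boundary-index table (break positions) followed by a
-- max-of-gaps pass: alternative decomposition, same O(n) cost.

-- ===== PORT A =====
def getLongestDecreasingSubarrayLength (array : List Int) : Int :=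
  let r := (PySem.List.pyRange 1 (array.length : Int) 1).foldl
    (fun (st : Int × Int) i =>
      if PySem.List.pyGetD array i 0 < PySem.List.pyGetD array (i - 1) 0 then
        (max st.1 (st.2 + 1), st.2 + 1)
      else
        (st.1, 1)) (1, 1)
  if r.1 > 1 then r.1 else -1

-- ===== PORT B =====
def getLongestDecreasingSubarrayLength_alt (array : List Int) : Int :=
  let n : Int := array.length
  let bounds : List Int :=
    [0] ++ (PySem.List.pyRange 1 n 1).filter
      (fun i => decide (PySem.List.pyGetD array i 0 ≥ PySem.List.pyGetD array (i - 1) 0)) ++ [n]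
  let best := (bounds.zip bounds.tail).foldl (fun b p => max b (p.2 - p.1)) 0
  if best > 1 then best else -1

-- ===== PRECONDITION & SPEC =====
def Spec_getLongestDecreasingSubarrayLength (array : List Int) (out : Int) : Prop := out = getLongestDecreasingSubarrayLength_alt array
instance (array : List Int) (out : Int) : Decidable (Spec_getLongestDecreasingSubarrayLength array out) := by unfold Spec_getLongestDecreasingSubarrayLength; infer_instance

-- ===== CLAIM (what is proved, stated in full; the proofs are below) =====
def Claim_equal_getLongestDecreasingSubarrayLength : Prop := ∀ (array : List Int), Dom_getLongestDecreasingSubarrayLength array → Spec_getLongestDecreasingSubarrayLength array (getLongestDecreasingSubarrayLength array)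

-- ===== LEMMAS AND PROOFS =====

-- A's loop body
def pvStep (a : List Int) (st : Int × Int) (i : Int) : Int × Int :=
  if PySem.List.pyGetD a i 0 < PySem.List.pyGetD a (i - 1) 0 then
    (max st.1 (st.2 + 1), st.2 + 1)
  else
    (st.1, 1)

-- B's break condition
def pvFlag (a : List Int) (i : Int) : Bool :=
  decide (PySem.List.pyGetD a i 0 ≥ PySem.List.pyGetD a (i - 1) 0)

-- break indices strictly below t
def pvBk (a : List Int) (t : Int) : List Int :=
  (PySem.List.pyRange 1 t 1).filter (pvFlag a)

-- max of the consecutive gaps of a list (B's second pass)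
def pvG (xs : List Int) : Int :=
  (xs.zip xs.tail).foldl (fun b p => max b (p.2 - p.1)) 0

-- last break (0 if none): written as a fold to stay non-dependent
def pvLast (a : List Int) (t : Int) : Int :=
  (pvBk a t).foldl (fun _ x => x) 0

theorem pv_foldl_last : ∀ (l : List Int) (d : Int), l.foldl (fun _ x => x) d = l.getLastD d := by
  intro l
  induction l with
  | nil => intro d; rfl
  | cons x t ih => intro d; rw [List.getLastD_cons]; exact ih x

theorem pv_zip_tail_append : ∀ (xs : List Int) (y : Int), xs ≠ [] →
    (xs ++ [y]).zip (xs ++ [y]).tail = xs.zip xs.tail ++ [(xs.getLastD 0, y)] := by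
  intro xs
  induction xs with
  | nil => intro y h; exact absurd rfl h
  | cons a t ih =>
    intro y _
    cases t with
    | nil => simp
    | cons b t' =>
      have ih' := ih y (by simp)
      simp only [List.cons_append, List.tail_cons, List.zip_cons_cons] at ih' ⊢
      rw [ih']
      simp

theorem pvG_append (xs : List Int) (h : xs ≠ []) (y : Int) :
    pvG (xs ++ [y]) = max (pvG xs) (y - xs.getLastD 0) := by
  unfold pvG
  rw [pv_zip_tail_append xs y h, List.foldl_append]
  simp

theorem pv_invariant (a : List Int) : ∀ (m : Nat),
    ((PySem.List.pyRange 1 (1 + (m : Int)) 1).foldl (pvStep a) (1, 1)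
      = (max (pvG (0 :: pvBk a (1 + (m : Int)))) ((1 + (m : Int)) - pvLast a (1 + (m : Int))),
         (1 + (m : Int)) - pvLast a (1 + (m : Int))))
    ∧ pvLast a (1 + (m : Int)) ≤ (m : Int) := by
  intro m
  induction m with
  | zero =>
    have h0 : pvBk a 1 = [] := by
      unfold pvBk; rw [PySem.List.pyRange_one_eq_nil (by norm_num)]; rfl
    norm_num [pvG, pvLast, h0, PySem.List.pyRange_one_eq_nil]
  | succ k ih =>
    obtain ⟨ih1, ih2⟩ := ih
    have hca : ((k + 1 : Nat) : Int) = (k : Int) + 1 := by push_cast; ring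
    rw [hca]
    have hsplit : PySem.List.pyRange 1 (1 + ((k : Int) + 1)) 1
        = PySem.List.pyRange 1 (1 + (k : Int)) 1 ++ [1 + (k : Int)] := by
      rw [show (1 : Int) + ((k : Int) + 1) = (1 + (k : Int)) + 1 by ring]
      exact PySem.List.pyRange_one_succ_right (by omega)
    have hFold : (PySem.List.pyRange 1 (1 + ((k : Int) + 1)) 1).foldl (pvStep a) (1, 1)
        = pvStep a ((PySem.List.pyRange 1 (1 + (k : Int)) 1).foldl (pvStep a) (1, 1)) (1 + (k : Int)) := by
      rw [hsplit, List.foldl_append]; rfl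
    have hBkt : pvBk a (1 + ((k : Int) + 1))
        = pvBk a (1 + (k : Int)) ++ (if pvFlag a (1 + (k : Int)) then [1 + (k : Int)] else []) := by
      unfold pvBk; rw [hsplit, List.filter_append]
      cases h : pvFlag a (1 + (k : Int)) <;> simp [List.filter, h]
    by_cases hf : pvFlag a (1 + (k : Int)) = true
    · -- break at index 1+k: the run resets
      have hge : PySem.List.pyGetD a ((1 + (k : Int)) - 1) 0 ≤ PySem.List.pyGetD a (1 + (k : Int)) 0 := by
        unfold pvFlag at hf; exact of_decide_eq_true hf
      have hstep : ∀ st : Int × Int, pvStep a st (1 + (k : Int)) = (st.1, 1) := by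
        intro st; unfold pvStep; rw [if_neg (by omega)]
      have hBk : pvBk a (1 + ((k : Int) + 1)) = pvBk a (1 + (k : Int)) ++ [1 + (k : Int)] := by
        rw [hBkt, hf]; simp
      have hL : pvLast a (1 + ((k : Int) + 1)) = 1 + (k : Int) := by
        unfold pvLast; rw [hBk, List.foldl_append]; rfl
      have hG : pvG (0 :: pvBk a (1 + ((k : Int) + 1)))
          = max (pvG (0 :: pvBk a (1 + (k : Int)))) ((1 + (k : Int)) - pvLast a (1 + (k : Int))) := by
        rw [hBk,
          show (0 : Int) :: (pvBk a (1 + (k : Int)) ++ [1 + (k : Int)])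
              = ((0 : Int) :: pvBk a (1 + (k : Int))) ++ [1 + (k : Int)] from rfl,
          pvG_append _ (by simp)]
        rw [List.getLastD_cons, ← pv_foldl_last]
        rfl
      refine ⟨?_, by rw [hL]; omega⟩
      rw [hFold, ih1, hstep, hG, hL]
      have hc1 : 1 ≤ (1 + (k : Int)) - pvLast a (1 + (k : Int)) := by omega
      have : (1 : Int) + ((k : Int) + 1) - (1 + (k : Int)) = 1 := by ring
      rw [this, max_eq_left (le_trans hc1 (le_max_right _ _))]
    · -- strictly decreasing step: the run grows by one
      have hlt : PySem.List.pyGetD a (1 + (k : Int)) 0 < PySem.List.pyGetD a ((1 + (k : Int)) - 1) 0 := by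
        unfold pvFlag at hf
        have := of_decide_eq_false (Bool.eq_false_iff.mpr hf ▸ rfl : decide (PySem.List.pyGetD a ((1 + (k : Int)) - 1) 0 ≤ PySem.List.pyGetD a (1 + (k : Int)) 0) = false)
        omega
      have hstep : ∀ st : Int × Int, pvStep a st (1 + (k : Int)) = (max st.1 (st.2 + 1), st.2 + 1) := by
        intro st; unfold pvStep; rw [if_pos hlt]
      have hBk : pvBk a (1 + ((k : Int) + 1)) = pvBk a (1 + (k : Int)) := by
        rw [hBkt]; simp [hf]
      have hL : pvLast a (1 + ((k : Int) + 1)) = pvLast a (1 + (k : Int)) := by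
        unfold pvLast; rw [hBk]
      refine ⟨?_, by rw [hL]; omega⟩
      rw [hFold, ih1, hstep, hBk, hL]
      have h2 : (1 : Int) + ((k : Int) + 1) - pvLast a (1 + (k : Int))
          = ((1 + (k : Int)) - pvLast a (1 + (k : Int))) + 1 := by ring
      rw [h2, max_assoc, max_eq_right (by omega : (1 + (k : Int)) - pvLast a (1 + (k : Int)) ≤ (1 + (k : Int)) - pvLast a (1 + (k : Int)) + 1)]

theorem pv_portA_eq (a : List Int) : getLongestDecreasingSubarrayLength a =
    (let r := (PySem.List.pyRange 1 (a.length : Int) 1).foldl (pvStep a) (1, 1)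
     if r.1 > 1 then r.1 else -1) := rfl

theorem pv_portB_eq (a : List Int) : getLongestDecreasingSubarrayLength_alt a =
    (let best := pvG (((0 : Int) :: pvBk a (a.length : Int)) ++ [(a.length : Int)])
     if best > 1 then best else -1) := rfl

-- ===== VERDICT (by name: the statement is the Claim_ definition above) =====
theorem getLongestDecreasingSubarrayLength_spec : Claim_equal_getLongestDecreasingSubarrayLength := by
  intro a _
  unfold Spec_getLongestDecreasingSubarrayLength
  cases a with
  | nil => decide
  | cons x t =>
    rw [pv_portA_eq, pv_portB_eq]
    have hn : (((x :: t).length : Int)) = 1 + (t.length : Int) := by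
      push_cast [List.length_cons]; ring
    simp only [hn]
    obtain ⟨h1, h2⟩ := pv_invariant (x :: t) t.length
    rw [h1, pvG_append _ (by simp), List.getLastD_cons, ← pv_foldl_last]
    rfl
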